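-- pv_equiv track=rewrite | github.com/Fondamenti18/fondamenti-di-programmazione | students/1764847/homework04/program01.py | levels1
-- ===== SOURCE A (Python) =====
-- def levels1(d, diz, cnt, lstFigli, lst):
--     # Se la lista e' vuota restituisce il dizionario
--     if lstFigli == []:
--         return diz
--     # Per ogni figlio in lstFigli
--     for i in lstFigli:
--         # Aggiunge i figli di i nella lista
--         lst += d[i]
--     # Se lst non e' vuota
--     if lst != []:
--         # Aggiunge al dizionario una nuova chiave che rappresenta l'altezza
--         # e come valore la lista ordinata di tutti i nodi che si trovano in quell'altezza
--         diz[cnt] = sorted(lst)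
--     # Chiama la funzione ricorsivamente
--     levels1(d, diz, cnt +1, lst, [])
--     return diz
-- ===== SOURCE B (Python) =====
-- def levels1(d, diz, cnt, lstFigli, lst):
--     # Two-phase rewrite: first collect the per-height level lists, then write them
--     # into diz. Agrees with A on the return value; unlike A it does not mutate lst.
--     if lstFigli == []:
--         return diz
--     cur = lst + [c for i in lstFigli for c in d[i]]
--     levels = []
--     while cur:
--         levels.append(cur)
--         cur = [c for i in cur for c in d[i]]
--     for lev in levels:
--         diz[cnt] = sorted(lev)
--         cnt += 1
--     return diz
-- ===== Notes on version B (the rewrite author's own statement) =====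
-- stated objective: alternative
-- what changed: A's tail recursion, which interleaves computing each BFS level with writing it into diz, is split into two phases: an iterative loop that first collects the successive nonempty level lists, then a simple loop writing sorted(level) into diz at consecutive keys; B also avoids A's recursion depth and does not mutate the caller's lst (return value is identical).
import Mathlib
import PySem

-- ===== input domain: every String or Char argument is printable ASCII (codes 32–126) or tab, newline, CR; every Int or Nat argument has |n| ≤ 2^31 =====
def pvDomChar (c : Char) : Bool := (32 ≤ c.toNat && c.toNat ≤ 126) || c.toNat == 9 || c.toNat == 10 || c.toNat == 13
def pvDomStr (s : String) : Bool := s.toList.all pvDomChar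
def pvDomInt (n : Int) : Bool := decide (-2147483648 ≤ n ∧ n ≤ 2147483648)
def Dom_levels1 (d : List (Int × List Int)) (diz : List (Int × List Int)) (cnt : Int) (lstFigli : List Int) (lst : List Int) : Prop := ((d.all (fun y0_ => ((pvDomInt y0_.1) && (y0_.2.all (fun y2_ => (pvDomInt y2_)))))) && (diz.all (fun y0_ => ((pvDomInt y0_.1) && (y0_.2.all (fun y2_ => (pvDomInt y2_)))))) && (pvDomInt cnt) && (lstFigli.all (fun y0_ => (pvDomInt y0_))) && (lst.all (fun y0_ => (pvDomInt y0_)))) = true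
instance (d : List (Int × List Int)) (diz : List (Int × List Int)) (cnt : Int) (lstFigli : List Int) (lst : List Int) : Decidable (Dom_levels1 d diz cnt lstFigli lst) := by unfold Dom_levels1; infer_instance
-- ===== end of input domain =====

-- B replaces A's tail recursion (which interleaves computing each level with writing diz) by two
-- phases: collect all nonempty level lists, then write them into diz; equivalence is about the
-- RETURN value only (Python A extends the caller's lst in place, Python B does not; both mutate diz).

-- ===== PORT A =====
-- d[i] of the Python dict d; [] only where the key is absent (Python raises KeyError there — outside Pre_)
def levels1Children (d : List (Int × List Int)) (i : Int) : List Int :=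
  (PySem.Dict.mk d).getD i []

-- A's recursion, with a fuel guard that merely makes it total: on every input satisfying
-- Pre_levels1 the frontier dies out within d.length+1 levels, so the guard is never the
-- reason a branch is taken differently from the Python.
def levels1Go (d : List (Int × List Int)) (fuel : Nat) (diz : List (Int × List Int)) (cnt : Int) (lstFigli : List Int) (lst : List Int) : List (Int × List Int) :=
  match fuel with
  | 0 => diz
  | fuel + 1 =>
    if lstFigli = [] then diz
    else
      -- for i in lstFigli: lst += d[i]
      let lst2 := lstFigli.foldl (fun acc i => acc ++ levels1Children d i) lst
      -- if lst != []: diz[cnt] = sorted(lst)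
      let diz2 := if lst2 ≠ [] then ((PySem.Dict.mk diz).insert cnt (PySem.List.sorted lst2 (fun x => x) false)).items else diz
      -- levels1(d, diz, cnt+1, lst, []); return diz  (diz is mutated in place, so the result IS the recursion's diz)
      levels1Go d fuel diz2 (cnt + 1) lst2 []

def levels1 (d : List (Int × List Int)) (diz : List (Int × List Int)) (cnt : Int) (lstFigli : List Int) (lst : List Int) : List (Int × List Int) :=
  levels1Go d (d.length + 2) diz cnt lstFigli lst

-- ===== PORT B =====
-- the while loop: collect the successive nonempty levels (same fuel guard for totality)
def levels1CollectLevels (d : List (Int × List Int)) (fuel : Nat) (cur : List Int) : List (List Int) :=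
  match fuel with
  | 0 => []
  | fuel + 1 =>
    if cur = [] then []
    else cur :: levels1CollectLevels d fuel (cur.flatMap (levels1Children d))

-- for lev in levels: diz[cnt] = sorted(lev); cnt += 1
def levels1InsLevels (diz : List (Int × List Int)) (cnt : Int) (levels : List (List Int)) : List (Int × List Int) :=
  (levels.foldl (fun p lev => (((PySem.Dict.mk p.1).insert p.2 (PySem.List.sorted lev (fun x => x) false)).items, p.2 + 1)) (diz, cnt)).1

def levels1_alt (d : List (Int × List Int)) (diz : List (Int × List Int)) (cnt : Int) (lstFigli : List Int) (lst : List Int) : List (Int × List Int) :=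
  if lstFigli = [] then diz
  else
    let cur := lst ++ lstFigli.flatMap (levels1Children d)
    let levels := levels1CollectLevels d (d.length + 2) cur
    levels1InsLevels diz cnt levels

-- ===== PRECONDITION & SPEC =====
-- nodes reachable from s along d's child edges in at most n steps (s itself included)
def levels1Reach (d : List (Int × List Int)) (n : Nat) (s : List Int) : List Int :=
  match n with
  | 0 => s
  | n + 1 => levels1Reach d n ((s ++ s.flatMap (levels1Children d)).dedup)

-- Pre_: exactly the inputs on which Python A returns (no KeyError, recursion terminates):
-- the frontier is empty, or every node reachable from lstFigli ∪ lst is a key of d and no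
-- reachable node lies on a cycle.  levels1Reach is plain graph reachability (bounded
-- transitive closure) of the input dict viewed as a graph — a property of the input, not a
-- re-run of either port (it yields a deduplicated node set; the ports build level lists and
-- diz).  The equivalence itself holds unconditionally; Pre_ only delimits where A returns.
def Pre_levels1 (d : List (Int × List Int)) (diz : List (Int × List Int)) (cnt : Int) (lstFigli : List Int) (lst : List Int) : Prop :=
  lstFigli = [] ∨
    ∀ i ∈ levels1Reach d d.length (lstFigli ++ lst).dedup,
      i ∈ d.map Prod.fst ∧ i ∉ levels1Reach d d.length (levels1Children d i)
instance (d : List (Int × List Int)) (diz : List (Int × List Int)) (cnt : Int) (lstFigli : List Int) (lst : List Int) : Decidable (Pre_levels1 d diz cnt lstFigli lst) := by unfold Pre_levels1; infer_instance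

def pvWitness_levels1 : (List (Int × List Int)) × (List (Int × List Int)) × Int × List Int × List Int :=
  ([(1, [2]), (2, [])], [], 0, [1], [])

def Spec_levels1 (d : List (Int × List Int)) (diz : List (Int × List Int)) (cnt : Int) (lstFigli : List Int) (lst : List Int) (out : List (Int × List Int)) : Prop := out = levels1_alt d diz cnt lstFigli lst
instance (d : List (Int × List Int)) (diz : List (Int × List Int)) (cnt : Int) (lstFigli : List Int) (lst : List Int) (out : List (Int × List Int)) : Decidable (Spec_levels1 d diz cnt lstFigli lst out) := by unfold Spec_levels1; infer_instance

-- ===== CLAIM (what is proved, stated in full; the proofs are below) =====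
def Claim_equal_levels1 : Prop := ∀ (d : List (Int × List Int)) (diz : List (Int × List Int)) (cnt : Int) (lstFigli : List Int) (lst : List Int), Dom_levels1 d diz cnt lstFigli lst → Pre_levels1 d diz cnt lstFigli lst → Spec_levels1 d diz cnt lstFigli lst (levels1 d diz cnt lstFigli lst)

-- ===== LEMMAS AND PROOFS =====

-- A's recursion at frontier cur with lst = [] equals B's "collect then insert" on the next level.
lemma levels1Go_eq_insLevels (d : List (Int × List Int)) :
    ∀ (fuel : Nat) (diz : List (Int × List Int)) (cnt : Int) (cur : List Int),
      levels1Go d fuel diz cnt cur [] =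
        levels1InsLevels diz cnt (levels1CollectLevels d fuel (cur.flatMap (levels1Children d))) := by
  intro fuel
  induction fuel with
  | zero => intro diz cnt cur; rfl
  | succ f ih =>
    intro diz cnt cur
    by_cases hc : cur = []
    · subst hc; simp [levels1Go, levels1CollectLevels, levels1InsLevels]
    · rw [levels1Go]
      simp only [if_neg hc]
      rw [PySem.List.foldl_append_eq_flatMap]
      simp only [List.nil_append]
      set nxt := cur.flatMap (levels1Children d) with hnxt
      by_cases hn : nxt = []
      · rw [hn]
        cases f with
        | zero => simp [levels1Go, levels1CollectLevels, levels1InsLevels]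
        | succ f' => simp [levels1Go, levels1CollectLevels, levels1InsLevels]
      · simp only [if_pos hn]
        rw [ih]
        rw [levels1CollectLevels]
        simp only [if_neg hn]
        rfl

lemma levels1Collect_cons (d : List (Int × List Int)) (f : Nat) (cur : List Int) (hc : cur ≠ []) :
    levels1CollectLevels d (f + 1) cur =
      cur :: levels1CollectLevels d f (cur.flatMap (levels1Children d)) := by
  rw [levels1CollectLevels]; simp [hc]

theorem levels1_spec : Claim_equal_levels1 := by
  intro d diz cnt lstFigli lst _ _
  unfold Spec_levels1 levels1 levels1_alt
  by_cases hf : lstFigli = []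
  · subst hf; simp [levels1Go]
  · simp only [if_neg hf]
    rw [levels1Go]
    simp only [if_neg hf]
    rw [PySem.List.foldl_append_eq_flatMap]
    set cur := lst ++ lstFigli.flatMap (levels1Children d) with hcur
    by_cases hc : cur = []
    · rw [hc]
      simp only [ne_eq, not_true_eq_false, if_false]
      rw [levels1Go_eq_insLevels]
      simp [levels1CollectLevels, levels1InsLevels]
    · simp only [ne_eq, hc, not_false_eq_true, if_true]
      rw [levels1Go_eq_insLevels]
      rw [show d.length + 2 = (d.length + 1) + 1 from rfl,
          levels1Collect_cons d (d.length + 1) cur hc]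
      rfl
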